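-- pv_equiv track=rewrite | github.com/ikr/algo-practice | hackerrank/Crossword_Puzzle/solution.py | word_placings
-- ===== SOURCE A (Python) =====
-- def word_placings(lines, places_delta):
--     result = []
--     for i in range(len(lines)):
--         origin = (i, 0) if places_delta[1] == 1 else (0, i)
--         wps = word_placings_from_line(lines[i], origin, places_delta)
--         if wps:
--             result += wps
--     return tuple(result)
--
-- def word_placings_from_line(line, origin_place, places_delta):
--     result = []
--     current = []
--     for i in range(len(line)):
--         if line[i] == '-':
--             dr, dc = map(lambda x: x * i, places_delta)
--             current.append((origin_place[0] + dr, origin_place[1] + dc))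
--         else:
--             if len(current) > 1:
--                 result.append(tuple(current))
--             current = []
--     if len(current) > 1:
--         result.append(tuple(current))
--     return tuple(result)
-- ===== SOURCE B (Python) =====
-- def word_placings(lines, places_delta):
--     result = []
--     for i, line in enumerate(lines):
--         origin = (i, 0) if places_delta[1] == 1 else (0, i)
--         result.extend(_runs(line, origin, places_delta))
--     return tuple(result)
--
--
-- def _runs(line, origin, delta):
--     """Two-pointer scan over maximal '-' runs (no flag/accumulator state machine)."""
--     out = []
--     j, n = 0, len(line)
--     while j < n:
--         if line[j] != '-':
--             j += 1
--             continue
--         k = j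
--         while k < n and line[k] == '-':
--             k += 1
--         if k - j > 1:
--             out.append(tuple((origin[0] + delta[0] * t, origin[1] + delta[1] * t)
--                              for t in range(j, k)))
--         j = k
--     return tuple(out)
-- ===== Notes on version B (the rewrite author's own statement) =====
-- stated objective: alternative
-- what changed: Replaces A's per-cell state machine (a 'current' accumulator flushed on each non-'-' cell and again after the loop) with a two-pointer scan that locates each maximal '-' run and emits its coordinate tuple directly, so no flush/trailing-run logic exists.
import Mathlib
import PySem

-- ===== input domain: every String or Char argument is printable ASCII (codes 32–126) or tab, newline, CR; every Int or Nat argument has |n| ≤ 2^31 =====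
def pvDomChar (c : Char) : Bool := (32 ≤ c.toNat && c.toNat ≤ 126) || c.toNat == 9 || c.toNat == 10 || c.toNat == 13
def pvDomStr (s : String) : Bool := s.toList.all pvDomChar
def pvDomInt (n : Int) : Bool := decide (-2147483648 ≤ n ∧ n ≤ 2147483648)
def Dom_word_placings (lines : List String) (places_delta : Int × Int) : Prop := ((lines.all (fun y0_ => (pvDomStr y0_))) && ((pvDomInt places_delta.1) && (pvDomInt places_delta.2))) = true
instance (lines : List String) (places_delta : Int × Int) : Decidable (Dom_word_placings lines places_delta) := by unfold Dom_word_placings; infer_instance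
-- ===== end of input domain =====

-- B replaces A's flag/current-accumulator state machine per line with a two-pointer scan
-- over maximal '-' runs (objective: alternative decomposition, same cost).

-- ===== PORT A =====
-- one step of A's inner loop: state = (result, current)
def wpStepA (origin delta : Int × Int)
    (st : List (List (Int × Int)) × List (Int × Int)) (ci : Char × Nat) :
    List (List (Int × Int)) × List (Int × Int) :=
  if ci.1 = '-' then
    (st.1, st.2 ++ [(origin.1 + delta.1 * (ci.2 : Int), origin.2 + delta.2 * (ci.2 : Int))])
  else if st.2.length > 1 then (st.1 ++ [st.2], []) else (st.1, [])

def word_placings_from_line (line : String) (origin delta : Int × Int) :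
    List (List (Int × Int)) :=
  let st := line.toList.zipIdx.foldl (wpStepA origin delta) ([], [])
  if st.2.length > 1 then st.1 ++ [st.2] else st.1

def word_placings (lines : List String) (places_delta : Int × Int) :
    List (List (Int × Int)) :=
  lines.zipIdx.foldl (fun acc li =>
    let origin : Int × Int :=
      if places_delta.2 = 1 then ((li.2 : Int), 0) else (0, (li.2 : Int))
    let wps := word_placings_from_line li.1 origin places_delta
    if wps ≠ [] then acc ++ wps else acc) []

-- ===== PORT B =====
-- the coordinates of a run of length len starting at cell index j
def wpCoords (origin delta : Int × Int) (j len : Nat) : List (Int × Int) :=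
  (List.range len).map (fun t =>
    (origin.1 + delta.1 * ((j + t : Nat) : Int), origin.2 + delta.2 * ((j + t : Nat) : Int)))

-- two-pointer run scan: at a '-' take the whole maximal run, else advance by one
def wpRuns (origin delta : Int × Int) : List Char → Nat → List (List (Int × Int))
  | [], _ => []
  | c :: rest, j =>
    if c = '-' then
      let len := ((c :: rest).takeWhile (fun x => x = '-')).length
      let tail := wpRuns origin delta ((c :: rest).dropWhile (fun x => x = '-')) (j + len)
      if len > 1 then wpCoords origin delta j len :: tail else tail
    else wpRuns origin delta rest (j + 1)
  termination_by cs _ => cs.length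
  decreasing_by
  · simp only [List.dropWhile_cons, ‹c = '-'›, decide_true, if_true]
    exact Nat.lt_succ_of_le (List.length_dropWhile_le _ _)
  · simp

def word_placings_alt (lines : List String) (places_delta : Int × Int) :
    List (List (Int × Int)) :=
  (lines.zipIdx.map (fun li =>
    let origin : Int × Int :=
      if places_delta.2 = 1 then ((li.2 : Int), 0) else (0, (li.2 : Int))
    wpRuns origin places_delta li.1.toList 0)).flatten

-- ===== PRECONDITION & SPEC =====
def Spec_word_placings (lines : List String) (places_delta : Int × Int) (out : List (List (Int × Int))) : Prop := out = word_placings_alt lines places_delta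
instance (lines : List String) (places_delta : Int × Int) (out : List (List (Int × Int))) : Decidable (Spec_word_placings lines places_delta out) := by unfold Spec_word_placings; infer_instance

-- ===== CLAIM (what is proved, stated in full; the proofs are below) =====
def Claim_equal_word_placings : Prop := ∀ (lines : List String) (places_delta : Int × Int), Dom_word_placings lines places_delta → Spec_word_placings lines places_delta (word_placings lines places_delta)

-- ===== LEMMAS AND PROOFS =====

def wpPt (origin delta : Int × Int) (m : Nat) : Int × Int :=
  (origin.1 + delta.1 * (m : Int), origin.2 + delta.2 * (m : Int))

lemma wpCoords_succ (origin delta : Int × Int) (j n : Nat) :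
    wpCoords origin delta j (n + 1)
      = wpPt origin delta j :: wpCoords origin delta (j + 1) n := by
  simp only [wpCoords, List.range_succ_eq_map, List.map_cons, List.map_map]
  congr 1
  apply List.map_congr_left
  intro t _
  have h : j + (t + 1) = (j + 1) + t := by omega
  rw [Function.comp_apply, Nat.succ_eq_add_one, h]

lemma wpCoords_length (origin delta : Int × Int) (j n : Nat) :
    (wpCoords origin delta j n).length = n := by
  simp [wpCoords]

-- folding A's step over a block of '-' cells only extends `current`
lemma wp_run_fold (origin delta : Int × Int) :
    ∀ (run : List Char), (∀ c ∈ run, c = '-') → ∀ (j : Nat) (res : List (List (Int × Int))) (cur : List (Int × Int)),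
      (run.zipIdx j).foldl (wpStepA origin delta) (res, cur)
        = (res, cur ++ wpCoords origin delta j run.length) := by
  intro run
  induction run with
  | nil => intro _ j res cur; simp [wpCoords]
  | cons c rest ih =>
    intro h j res cur
    have hc : c = '-' := h c (by simp)
    have hrest : ∀ x ∈ rest, x = '-' := fun x hx => h x (by simp [hx])
    rw [List.zipIdx_cons, List.foldl_cons]
    have hstep : wpStepA origin delta (res, cur) (c, j)
        = (res, cur ++ [wpPt origin delta j]) := by
      simp [wpStepA, hc, wpPt]
    rw [hstep, ih hrest (j + 1) res (cur ++ [wpPt origin delta j])]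
    rw [List.length_cons, wpCoords_succ]
    simp

-- A's per-line state machine equals B's run scan, with `res` already accumulated
lemma wp_line_eq (origin delta : Int × Int) :
    ∀ (n : Nat) (cs : List Char), cs.length ≤ n → ∀ (j : Nat) (res : List (List (Int × Int))),
      (let st := (cs.zipIdx j).foldl (wpStepA origin delta) (res, []);
       if st.2.length > 1 then st.1 ++ [st.2] else st.1)
        = res ++ wpRuns origin delta cs j := by
  intro n
  induction n with
  | zero =>
    intro cs hlen j res
    have : cs = [] := List.length_eq_zero_iff.mp (Nat.le_zero.mp hlen)
    subst this
    simp [wpRuns]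
  | succ n ih =>
    intro cs hlen j res
    match cs with
    | [] => simp [wpRuns]
    | c :: rest =>
      by_cases hc : c = '-'
      · obtain ⟨run, hrundef⟩ : ∃ r, r = (c :: rest).takeWhile (fun x => x = '-') := ⟨_, rfl⟩
        obtain ⟨rest', hrestdef⟩ : ∃ r, r = (c :: rest).dropWhile (fun x => x = '-') := ⟨_, rfl⟩
        have hsplit : c :: rest = run ++ rest' := by
          rw [hrundef, hrestdef, List.takeWhile_append_dropWhile]
        have hrun : ∀ x ∈ run, x = '-' := fun x hx => by
          rw [hrundef] at hx
          have := List.mem_takeWhile_imp hx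
          simpa using this
        have hrunlen : 1 ≤ run.length := by
          rw [hrundef, List.takeWhile_cons]
          simp [hc]
        have hfold :
            ((c :: rest).zipIdx j).foldl (wpStepA origin delta) (res, ([] : List (Int × Int)))
              = (rest'.zipIdx (j + run.length)).foldl (wpStepA origin delta)
                  (res, wpCoords origin delta j run.length) := by
          conv_lhs => rw [hsplit]
          rw [List.zipIdx_append, List.foldl_append, wp_run_fold origin delta run hrun j res []]
          simp
        have hB : wpRuns origin delta (c :: rest) j
            = if run.length > 1
              then wpCoords origin delta j run.length :: wpRuns origin delta rest' (j + run.length)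
              else wpRuns origin delta rest' (j + run.length) := by
          rw [wpRuns, if_pos hc, ← hrundef, ← hrestdef]
        have hlensplit : run.length + rest'.length = rest.length + 1 := by
          have := congrArg List.length hsplit
          simpa using this.symm
        cases hrest' : rest' with
        | nil =>
          rw [hrest'] at hfold
          have hnil : wpRuns origin delta ([] : List Char) (j + run.length) = [] := by
            rw [wpRuns]
          rw [hrest', hnil] at hB
          simp only [hfold, List.zipIdx_nil, List.foldl_nil, hB, wpCoords_length]
          by_cases hgt : run.length > 1 <;> simp [hgt]
        | cons d rest'' =>
          rw [hrest'] at hfold hB hlensplit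
          have hd : ¬ d = '-' := by
            have h0 := List.head?_dropWhile_not (fun x => decide (x = '-')) (c :: rest)
            rw [← hrestdef, hrest'] at h0
            simpa using h0
          have hstep : wpStepA origin delta (res, wpCoords origin delta j run.length)
              (d, j + run.length)
              = ((if run.length > 1 then res ++ [wpCoords origin delta j run.length] else res),
                 []) := by
            simp only [wpStepA]
            rw [if_neg hd, wpCoords_length]
            by_cases hgt : run.length > 1 <;> simp [hgt]
          have hlen'' : rest''.length ≤ n := by
            simp only [List.length_cons] at hlensplit hlen
            omega
          have hBtail : wpRuns origin delta (d :: rest'') (j + run.length)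
              = wpRuns origin delta rest'' (j + run.length + 1) := by
            rw [wpRuns, if_neg hd]
          have ihres := ih rest'' hlen'' (j + run.length + 1)
            (if run.length > 1 then res ++ [wpCoords origin delta j run.length] else res)
          simp only [hfold]
          rw [List.zipIdx_cons, List.foldl_cons, hstep, ihres, hB, hBtail]
          by_cases hgt : run.length > 1 <;> simp [hgt]
      · have hstep : wpStepA origin delta (res, ([] : List (Int × Int))) (c, j) = (res, []) := by
          simp [wpStepA, hc]
        have hB : wpRuns origin delta (c :: rest) j = wpRuns origin delta rest (j + 1) := by
          rw [wpRuns, if_neg hc]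
        rw [List.zipIdx_cons, List.foldl_cons, hstep, hB]
        exact ih rest (by simpa using Nat.lt_succ_iff.mp (by simpa using hlen)) (j + 1) res

-- each line of A equals the corresponding run scan of B
lemma wp_from_line_eq (line : String) (origin delta : Int × Int) :
    word_placings_from_line line origin delta = wpRuns origin delta line.toList 0 := by
  have := wp_line_eq origin delta line.toList.length line.toList le_rfl 0 []
  simpa [word_placings_from_line] using this

-- A's outer accumulation equals flatten-of-map
lemma wp_top (delta : Int × Int) :
    ∀ (L : List (String × Nat)) (acc : List (List (Int × Int))),
      L.foldl (fun acc li =>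
        let origin : Int × Int :=
          if delta.2 = 1 then ((li.2 : Int), 0) else (0, (li.2 : Int))
        let wps := word_placings_from_line li.1 origin delta
        if wps ≠ [] then acc ++ wps else acc) acc
      = acc ++ (L.map (fun li =>
          let origin : Int × Int :=
            if delta.2 = 1 then ((li.2 : Int), 0) else (0, (li.2 : Int))
          wpRuns origin delta li.1.toList 0)).flatten := by
  intro L
  induction L with
  | nil => intro acc; simp
  | cons li L ih =>
    intro acc
    have hif : ∀ (a w : List (List (Int × Int))), (if w ≠ [] then a ++ w else a) = a ++ w := by
      intro a w; by_cases hw : w = [] <;> simp [hw]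
    rw [List.foldl_cons, ih, List.map_cons, List.flatten_cons]
    simp only [hif, wp_from_line_eq, List.append_assoc]

-- ===== VERDICT (by name: the statement is the Claim_ definition above) =====
theorem word_placings_spec : Claim_equal_word_placings := by
  intro lines delta _
  unfold Spec_word_placings word_placings word_placings_alt
  simpa using wp_top delta lines.zipIdx []
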